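-- pv_equiv track=rewrite | github.com/cbobed/PartMining | sid/PartMining/VectorTools.py | custom_order_db
-- ===== SOURCE A (Python) =====
-- def custom_order_db (item_list):
--     atEnd = False;
--     result = []
--     for it in sorted(item_list):
--         if not atEnd:
--             result.insert(0,it)
--         else:
--             result.append(it)
--         atEnd = not atEnd
--     return result
-- ===== SOURCE B (Python) =====
-- def custom_order_db(item_list):
--     # sort once; even-indexed items (the front-inserts) end up reversed at the
--     # front, odd-indexed items are appended in order
--     s = sorted(item_list)
--     return s[::2][::-1] + s[1::2]
-- ===== Notes on version B (the rewrite author's own statement) =====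
-- stated objective: faster
-- what changed: Replaces the alternating front-insert/append loop with one sort plus two strided slices: the even-indexed sorted items reversed, concatenated with the odd-indexed ones.
import Mathlib
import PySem

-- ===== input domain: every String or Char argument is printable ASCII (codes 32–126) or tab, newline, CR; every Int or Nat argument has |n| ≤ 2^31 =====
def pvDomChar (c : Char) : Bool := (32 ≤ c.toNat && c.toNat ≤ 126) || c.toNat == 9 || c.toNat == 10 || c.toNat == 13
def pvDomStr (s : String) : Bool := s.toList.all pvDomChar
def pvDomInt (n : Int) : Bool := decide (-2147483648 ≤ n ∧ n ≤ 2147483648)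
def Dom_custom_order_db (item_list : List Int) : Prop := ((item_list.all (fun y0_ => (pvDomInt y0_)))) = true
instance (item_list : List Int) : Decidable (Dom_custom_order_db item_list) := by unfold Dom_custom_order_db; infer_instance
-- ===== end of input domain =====

-- B replaces A's alternating front-insert/append loop by one sort plus two strided
-- slices (even-indexed items reversed ++ odd-indexed items): O(n log n) vs O(n^2).

-- ===== PORT A =====
-- A: toggle flag, result.insert(0,it) (= cons, exact for index 0) or result.append(it)
def custom_order_db (item_list : List Int) : List Int :=
  (((PySem.List.sorted item_list (fun x => x))).foldl
    (fun (st : List Int × Bool) it =>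
      if !st.2 then (it :: st.1, !st.2) else (st.1 ++ [it], !st.2))
    ([], false)).1

-- ===== PORT B =====
-- hand port of the strided slice xs[::2] (full bounds, positive step 2): exact,
-- it takes every second element starting at index 0
def pvStride2 {α : Type} : List α → List α
  | [] => []
  | [x] => [x]
  | x :: _ :: rest => x :: pvStride2 rest

-- s[::2][::-1] + s[1::2]  (s[1::2] = every second element of s.tail)
def custom_order_db_alt (item_list : List Int) : List Int :=
  let s := (PySem.List.sorted item_list (fun x => x))
  (pvStride2 s).reverse ++ pvStride2 s.tail

-- ===== PRECONDITION & SPEC =====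
def Spec_custom_order_db (item_list : List Int) (out : List Int) : Prop := out = custom_order_db_alt item_list
instance (item_list : List Int) (out : List Int) : Decidable (Spec_custom_order_db item_list out) := by unfold Spec_custom_order_db; infer_instance

-- ===== CLAIM (what is proved, stated in full; the proofs are below) =====
def Claim_equal_custom_order_db : Prop := ∀ (item_list : List Int), Dom_custom_order_db item_list → Spec_custom_order_db item_list (custom_order_db item_list)

-- ===== LEMMAS AND PROOFS =====

theorem pvStride2_cons {α : Type} (x : α) (s : List α) :
    pvStride2 (x :: s) = x :: pvStride2 s.tail := by
  cases s <;> simp [pvStride2]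

theorem pv_loop (s : List Int) : ∀ (res : List Int),
    ((s.foldl (fun (st : List Int × Bool) it =>
        if !st.2 then (it :: st.1, !st.2) else (st.1 ++ [it], !st.2)) (res, false)).1
      = (pvStride2 s).reverse ++ res ++ pvStride2 s.tail)
    ∧ ((s.foldl (fun (st : List Int × Bool) it =>
        if !st.2 then (it :: st.1, !st.2) else (st.1 ++ [it], !st.2)) (res, true)).1
      = (pvStride2 s.tail).reverse ++ res ++ pvStride2 s) := by
  induction s with
  | nil => intro res; simp [pvStride2]
  | cons x s ih =>
    intro res
    constructor
    · rw [List.foldl_cons]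
      show (List.foldl _ ((x :: res : List Int), true) s).1 = _
      rw [(ih (x :: res)).2, pvStride2_cons]
      simp
    · rw [List.foldl_cons]
      show (List.foldl _ ((res ++ [x] : List Int), false) s).1 = _
      rw [(ih (res ++ [x])).1, pvStride2_cons]
      simp

-- ===== VERDICT (by name: the statement is the Claim_ definition above) =====
theorem custom_order_db_spec : Claim_equal_custom_order_db := by
  intro item_list _
  unfold Spec_custom_order_db custom_order_db custom_order_db_alt
  simpa using (pv_loop ((PySem.List.sorted item_list (fun x => x))) []).1
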